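-- pv_equiv track=rewrite | github.com/habtew/A2SV-competitive-programming | 2840-check-if-strings-can-be-made-equal-with-operations-ii/2840-check-if-strings-can-be-made-equal-with-operations-ii.py | checkStrings
-- ===== SOURCE A (Python) =====
-- def checkStrings(s1: str, s2: str) -> bool:
--     # 0, a, c, b == c, b, a
--     # 2, b, d, a == a, d, b
--     even_s1, odd_s1 = '', ''
--     even_s2, odd_s2 = '', ''
--
--     for i in range(len(s1)):
--         if i % 2 == 0:
--             even_s1 += s1[i]
--         else:
--             odd_s1 += s1[i]
--     for i in range(len(s2)):
--         if i % 2 == 0: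
--             even_s2 += s2[i]
--         else:
--             odd_s2 += s2[i]
--
--     even = sorted(even_s1) == sorted(even_s2)
--     odd = sorted(odd_s1) == sorted(odd_s2)
--     return even and odd
-- ===== SOURCE B (Python) =====
-- def checkStrings(s1: str, s2: str) -> bool:
--     # One fused signed-balance table keyed by (index parity, char): +1 for s1, -1 for s2.
--     d = {}
--     for i, c in enumerate(s1):
--         k = (i % 2, c)
--         d[k] = d.get(k, 0) + 1
--     for i, c in enumerate(s2):
--         k = (i % 2, c)
--         d[k] = d.get(k, 0) - 1
--     return all(v == 0 for v in d.values())
-- ===== Notes on version B (the rewrite author's own statement) =====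
-- stated objective: alternative
-- what changed: Replaces A's split-into-four-substrings-then-sort-and-compare with a single signed balance table keyed by (index parity, char): one pass adds 1 per s1 character, one pass subtracts 1 per s2 character, and the answer is whether every balance is zero.
import Mathlib
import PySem

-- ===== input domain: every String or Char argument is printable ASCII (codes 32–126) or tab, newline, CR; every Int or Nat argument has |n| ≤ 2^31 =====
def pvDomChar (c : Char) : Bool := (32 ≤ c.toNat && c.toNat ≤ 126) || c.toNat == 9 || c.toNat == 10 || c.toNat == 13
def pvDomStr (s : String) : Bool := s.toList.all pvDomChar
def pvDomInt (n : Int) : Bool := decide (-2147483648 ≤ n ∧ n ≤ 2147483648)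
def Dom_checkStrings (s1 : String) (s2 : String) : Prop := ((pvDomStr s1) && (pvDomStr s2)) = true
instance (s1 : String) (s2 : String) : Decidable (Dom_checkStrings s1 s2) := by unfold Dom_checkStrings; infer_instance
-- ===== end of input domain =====

-- B replaces A's split-into-four-substrings-then-sort-and-compare with one signed balance
-- table keyed by (index parity, char); same result, no sorting (objective: alternative).

-- ===== PORT A =====
def checkStrings (s1 : String) (s2 : String) : Bool :=
  let p1 : List Char × List Char :=
    (PySem.List.pyRange 0 (PySem.Str.len s1) 1).foldl
      (fun eo i =>
        if PySem.Int.mod i 2 == 0 then (eo.1 ++ [PySem.List.pyGetD s1.toList i ' '], eo.2)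
        else (eo.1, eo.2 ++ [PySem.List.pyGetD s1.toList i ' '])) ([], [])
  let p2 : List Char × List Char :=
    (PySem.List.pyRange 0 (PySem.Str.len s2) 1).foldl
      (fun eo i =>
        if PySem.Int.mod i 2 == 0 then (eo.1 ++ [PySem.List.pyGetD s2.toList i ' '], eo.2)
        else (eo.1, eo.2 ++ [PySem.List.pyGetD s2.toList i ' '])) ([], [])
  let even := PySem.List.sorted p1.1 (fun x => x) == PySem.List.sorted p2.1 (fun x => x)
  let odd := PySem.List.sorted p1.2 (fun x => x) == PySem.List.sorted p2.2 (fun x => x)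
  even && odd

-- ===== PORT B =====
def checkStrings_alt (s1 : String) (s2 : String) : Bool :=
  let d1 := (PySem.List.enumerate s1.toList).foldl
      (fun d p => d.insert (PySem.Int.mod p.1 2, p.2) (d.getD (PySem.Int.mod p.1 2, p.2) 0 + 1))
      (PySem.Dict.empty : PySem.Dict (Int × Char) Int)
  let d2 := (PySem.List.enumerate s2.toList).foldl
      (fun d p => d.insert (PySem.Int.mod p.1 2, p.2) (d.getD (PySem.Int.mod p.1 2, p.2) 0 - 1))
      d1
  d2.values.all (fun v => v == 0)

-- ===== PRECONDITION & SPEC =====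
def Spec_checkStrings (s1 : String) (s2 : String) (out : Bool) : Prop := out = checkStrings_alt s1 s2
instance (s1 : String) (s2 : String) (out : Bool) : Decidable (Spec_checkStrings s1 s2 out) := by unfold Spec_checkStrings; infer_instance

-- ===== CLAIM (what is proved, stated in full; the proofs are below) =====
def Claim_equal_checkStrings : Prop := ∀ (s1 : String) (s2 : String), Dom_checkStrings s1 s2 → Spec_checkStrings s1 s2 (checkStrings s1 s2)

-- ===== LEMMAS AND PROOFS =====

-- the key (i % 2, c) used by B
def pvKey (p : Int × Char) : Int × Char := (PySem.Int.mod p.1 2, p.2)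

def pvKeyed (xs : List Char) : List (Int × Char) := (PySem.List.enumerate xs).map pvKey

def pvEvens (xs : List Char) : List Char :=
  ((PySem.List.enumerate xs).filter (fun p => PySem.Int.mod p.1 2 == 0)).map Prod.snd

def pvOdds (xs : List Char) : List Char :=
  ((PySem.List.enumerate xs).filter (fun p => !(PySem.Int.mod p.1 2 == 0))).map Prod.snd

theorem pvMod2 (i : Int) : PySem.Int.mod i 2 = 0 ∨ PySem.Int.mod i 2 = 1 := by
  unfold PySem.Int.mod
  rw [Int.fmod_eq_emod_of_nonneg _ (by norm_num)]
  omega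

theorem pvSplitFold (l : List (Int × Char)) (e o : List Char) :
    l.foldl (fun (eo : List Char × List Char) p =>
        if PySem.Int.mod p.1 2 == 0 then (eo.1 ++ [p.2], eo.2) else (eo.1, eo.2 ++ [p.2])) (e, o)
    = (e ++ (l.filter (fun p => PySem.Int.mod p.1 2 == 0)).map Prod.snd,
       o ++ (l.filter (fun p => !(PySem.Int.mod p.1 2 == 0))).map Prod.snd) := by
  induction l generalizing e o with
  | nil => simp
  | cons x t ih =>
    rw [List.foldl_cons]
    by_cases h : (PySem.Int.mod x.1 2 == 0) = true
    · rw [if_pos h, ih]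
      simp only [List.filter_cons, h, Bool.not_true, if_pos, List.map_cons, List.append_assoc,
        List.singleton_append, if_neg, Bool.false_eq_true, not_false_iff]
    · rw [if_neg h, ih]
      rw [Bool.not_eq_true] at h
      simp only [List.filter_cons, h, Bool.not_false, List.map_cons, List.append_assoc,
        List.singleton_append, Bool.false_eq_true, if_neg, not_false_iff, if_pos]

theorem pvFoldA (s : String) :
    (PySem.List.pyRange 0 (PySem.Str.len s) 1).foldl
      (fun (eo : List Char × List Char) i =>
        if PySem.Int.mod i 2 == 0 then (eo.1 ++ [PySem.List.pyGetD s.toList i ' '], eo.2)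
        else (eo.1, eo.2 ++ [PySem.List.pyGetD s.toList i ' '])) ([], [])
    = (pvEvens s.toList, pvOdds s.toList) := by
  have hlen : PySem.List.pyRange 0 (PySem.Str.len s) 1
      = PySem.List.pyRange 0 (PySem.List.len s.toList) 1 := by
    norm_num [PySem.Str.len_eq, PySem.List.len]
  rw [hlen]
  have h : (PySem.List.pyRange 0 (PySem.List.len s.toList) 1).foldl
      (fun (eo : List Char × List Char) i =>
        if PySem.Int.mod i 2 == 0 then (eo.1 ++ [PySem.List.pyGetD s.toList i ' '], eo.2)
        else (eo.1, eo.2 ++ [PySem.List.pyGetD s.toList i ' '])) ([], [])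
      = ((PySem.List.pyRange 0 (PySem.List.len s.toList) 1).map
          (fun j => (j, PySem.List.pyGetD s.toList j ' '))).foldl
        (fun (eo : List Char × List Char) p =>
          if PySem.Int.mod p.1 2 == 0 then (eo.1 ++ [p.2], eo.2) else (eo.1, eo.2 ++ [p.2])) ([], []) := by
    rw [List.foldl_map]
  rw [h, ← PySem.List.enumerate_eq_map_pyRange s.toList ' ', pvSplitFold]
  simp [pvEvens, pvOdds]

-- the -1 twin of PySem.Dict.getD_foldl_insert_add_one
theorem pvGetDFoldSub {κ : Type} [BEq κ] [LawfulBEq κ] [DecidableEq κ]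
    (l : List κ) (d : PySem.Dict κ Int) (v : κ) :
    (l.foldl (fun d x => d.insert x (d.getD x 0 - 1)) d).getD v 0 = d.getD v 0 - l.count v := by
  induction l generalizing d with
  | nil => simp
  | cons x t ih =>
    rw [List.foldl_cons, ih, PySem.Dict.getD_insert, List.count_cons]
    by_cases h : v = x
    · subst h
      simp only [BEq.rfl, if_pos]
      push_cast
      ring
    · have hx : (x == v) = false := by
        rw [beq_eq_false_iff_ne]
        exact fun hc => h hc.symm
      simp only [if_neg h, hx, Bool.false_eq_true, if_neg, not_false_iff]
      push_cast
      ring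

-- B's two loops are folds of the keyed lists
theorem pvAltEq (s1 s2 : String) :
    checkStrings_alt s1 s2 =
      (((pvKeyed s2.toList).foldl (fun d k => d.insert k (d.getD k 0 - 1))
        ((pvKeyed s1.toList).foldl (fun d k => d.insert k (d.getD k 0 + 1))
          (PySem.Dict.empty : PySem.Dict (Int × Char) Int))).values.all
        (fun v => v == 0)) := by
  unfold checkStrings_alt pvKeyed pvKey
  rw [List.foldl_map, List.foldl_map]

theorem pvCntKeyed (xs : List Char) (k : Int × Char) :
    (pvKeyed xs).count k = ((PySem.List.enumerate xs).countP (fun p => pvKey p == k)) := by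
  rw [pvKeyed, List.count_eq_countP, List.countP_map]
  rfl

theorem pvCountEvens (xs : List Char) (c : Char) :
    (pvEvens xs).count c = (pvKeyed xs).count (0, c) := by
  rw [pvCntKeyed, pvEvens, List.count_eq_countP, List.countP_map, List.countP_filter]
  apply List.countP_congr
  intro p _
  rcases pvMod2 p.1 with h | h <;>
    · simp only [Function.comp_apply, Bool.and_eq_true, beq_iff_eq, pvKey, Prod.mk.injEq, h]
      norm_num
      try tauto

theorem pvCountOdds (xs : List Char) (c : Char) :
    (pvOdds xs).count c = (pvKeyed xs).count (1, c) := by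
  rw [pvCntKeyed, pvOdds, List.count_eq_countP, List.countP_map, List.countP_filter]
  apply List.countP_congr
  intro p _
  rcases pvMod2 p.1 with h | h <;>
    · simp only [Function.comp_apply, Bool.and_eq_true, Bool.not_eq_true', beq_iff_eq,
        beq_eq_false_iff_ne, pvKey, Prod.mk.injEq, h]
      norm_num
      try tauto

theorem pvCountOther (xs : List Char) (q : Int) (c : Char) (h0 : q ≠ 0) (h1 : q ≠ 1) :
    (pvKeyed xs).count (q, c) = 0 := by
  rw [pvCntKeyed, List.countP_eq_zero]
  intro p _ hp
  have hk : pvKey p = (q, c) := by simpa using hp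
  have hq : PySem.Int.mod p.1 2 = q := congrArg Prod.fst hk
  rcases pvMod2 p.1 with h | h <;> rw [h] at hq <;> [exact h0 hq.symm; exact h1 hq.symm]

-- B is true iff every (parity, char) key is balanced between s1 and s2
theorem pvAltIff (s1 s2 : String) :
    checkStrings_alt s1 s2 = true ↔
      ∀ k : Int × Char, (pvKeyed s1.toList).count k = (pvKeyed s2.toList).count k := by
  rw [pvAltEq]
  set l1 := pvKeyed s1.toList with hl1
  set l2 := pvKeyed s2.toList with hl2
  set d1 := l1.foldl (fun d k => d.insert k (d.getD k 0 + 1))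
    (PySem.Dict.empty : PySem.Dict (Int × Char) Int) with hd1
  set d2 := l2.foldl (fun d k => d.insert k (d.getD k 0 - 1)) d1 with hd2
  have hget : ∀ k, d2.getD k 0 = (l1.count k : Int) - (l2.count k : Int) := by
    intro k
    rw [hd2, pvGetDFoldSub, hd1, PySem.Dict.getD_foldl_insert_add_one]
    simp
  have hnd : d2.keys.Nodup := by
    rw [hd2]
    refine PySem.Dict.nodup_keys_foldl_insert _ _ _ ?_
    rw [hd1]
    exact PySem.Dict.nodup_keys_foldl_insert _ _ _ (by simp)
  have hkeys : ∀ k, k ∈ d2.keys ↔ k ∈ l1 ∨ k ∈ l2 := by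
    intro k
    rw [hd2, PySem.Dict.keys_foldl_insert, PySem.Set.mem_update,
        hd1, PySem.Dict.keys_foldl_insert, PySem.Set.mem_update]
    simp
  rw [PySem.Dict.values_eq_map_keys d2 hnd 0]
  simp only [List.all_eq_true, List.mem_map]
  constructor
  · intro h k
    by_cases hm : k ∈ d2.keys
    · have hz : d2.getD k 0 = 0 := by simpa using h _ ⟨k, hm, rfl⟩
      rw [hget] at hz
      omega
    · have hni : ¬ (k ∈ l1 ∨ k ∈ l2) := fun hc => hm ((hkeys k).2 hc)
      rw [not_or] at hni
      rw [List.count_eq_zero.2 hni.1, List.count_eq_zero.2 hni.2]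
  · rintro h v ⟨k, _, rfl⟩
    rw [beq_iff_eq, hget]
    have := h k
    omega

-- A is true iff the same
theorem pvAIff (s1 s2 : String) :
    checkStrings s1 s2 = true ↔
      ∀ k : Int × Char, (pvKeyed s1.toList).count k = (pvKeyed s2.toList).count k := by
  unfold checkStrings
  rw [pvFoldA s1, pvFoldA s2]
  simp only [Bool.and_eq_true, beq_iff_eq,
    PySem.List.sorted_id_eq_sorted_id_iff_perm, List.perm_iff_count]
  constructor
  · rintro ⟨he, ho⟩ ⟨q, c⟩
    by_cases hq0 : q = 0
    · subst hq0; rw [← pvCountEvens, ← pvCountEvens]; exact he c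
    by_cases hq1 : q = 1
    · subst hq1; rw [← pvCountOdds, ← pvCountOdds]; exact ho c
    · rw [pvCountOther _ _ _ hq0 hq1, pvCountOther _ _ _ hq0 hq1]
  · intro h
    exact ⟨fun c => by rw [pvCountEvens, pvCountEvens]; exact h (0, c),
           fun c => by rw [pvCountOdds, pvCountOdds]; exact h (1, c)⟩

-- ===== VERDICT (by name: the statement is the Claim_ definition above) =====
theorem checkStrings_spec : Claim_equal_checkStrings := by
  intro s1 s2 _
  unfold Spec_checkStrings
  have hA := pvAIff s1 s2
  have hB := pvAltIff s1 s2
  cases ha : checkStrings s1 s2 <;> cases hb : checkStrings_alt s1 s2 <;> simp_all
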